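-- pv_equiv track=rewrite | github.com/mbassale/computer-science | interviews/templateString.py | templateString
-- ===== SOURCE A (Python) =====
-- def templateString(s, template):
--     charCounts = {}
--     for char in s:
--         if char in charCounts:
--             charCounts[char] += 1
--         else:
--             charCounts[char] = 1
--     result = ''
--     for char in template:
--         if char in charCounts:
--             result += char * charCounts[char]
--     return result
-- ===== SOURCE B (Python) =====
-- def templateString(s, template):
--     # Scatter pass: loop over s, distributing each occurrence into a per-template-position bucket.
--     parts = [''] * len(template)
--     for ch in s:
--         parts = [p + ch if t == ch else p for p, t in zip(parts, template)]
--     return ''.join(parts)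
-- ===== Notes on version B (the rewrite author's own statement) =====
-- stated objective: alternative
-- what changed: Inverts the traversal: instead of counting s into a dict and then walking template, B loops over s and scatters each occurrence into a bucket per template position (kept in a parts list), then joins the buckets; no count table and no per-template counting exists.
import Mathlib
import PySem

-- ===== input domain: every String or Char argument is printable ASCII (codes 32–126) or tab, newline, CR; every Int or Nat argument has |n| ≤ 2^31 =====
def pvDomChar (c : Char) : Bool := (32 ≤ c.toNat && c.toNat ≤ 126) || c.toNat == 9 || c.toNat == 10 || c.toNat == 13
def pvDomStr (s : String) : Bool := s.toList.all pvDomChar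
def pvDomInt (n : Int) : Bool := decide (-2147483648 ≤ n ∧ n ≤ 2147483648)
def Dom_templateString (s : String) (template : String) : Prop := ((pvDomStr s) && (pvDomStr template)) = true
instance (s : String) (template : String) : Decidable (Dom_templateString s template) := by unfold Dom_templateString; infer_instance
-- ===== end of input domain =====

-- B inverts the traversal: it loops over s, scattering each occurrence into a bucket per
-- template position, then joins the buckets (objective: alternative; no speed claim).


-- ===== PORT A =====
def templateString (s : String) (template : String) : String :=
  let charCounts : PySem.Dict Char Int :=
    s.toList.foldl
      (fun d c => if d.contains c then d.insert c (d.getD c 0 + 1) else d.insert c 1)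
      PySem.Dict.empty
  String.ofList
    (template.toList.foldl
      (fun r c => if charCounts.contains c then r ++ List.replicate (charCounts.getD c 0).toNat c else r)
      [])

-- ===== PORT B =====
def templateString_alt (s : String) (template : String) : String :=
  let parts : List (List Char) := List.replicate template.toList.length []
  let parts :=
    s.toList.foldl
      (fun parts ch =>
        (parts.zip template.toList).map (fun pt => if pt.2 == ch then pt.1 ++ [ch] else pt.1))
      parts
  String.ofList parts.flatten

-- ===== PRECONDITION & SPEC =====
def Spec_templateString (s : String) (template : String) (out : String) : Prop := out = templateString_alt s template
instance (s : String) (template : String) (out : String) : Decidable (Spec_templateString s template out) := by unfold Spec_templateString; infer_instance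

-- ===== CLAIM (what is proved, stated in full; the proofs are below) =====
def Claim_equal_templateString : Prop := ∀ (s : String) (template : String), Dom_templateString s template → Spec_templateString s template (templateString s template)

-- ===== LEMMAS AND PROOFS =====

-- A's counting loop is exactly Counter(s)
theorem pv_countLoop_eq_counter (xs : List Char) :
    xs.foldl (fun d c => if d.contains c then d.insert c (d.getD c 0 + 1) else d.insert c 1)
      PySem.Dict.empty = PySem.Dict.counter xs := by
  have hstep :
      (fun (d : PySem.Dict Char Int) c => if d.contains c then d.insert c (d.getD c 0 + 1) else d.insert c 1)
        = fun d c => d.insert c (d.getD c 0 + 1) := by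
    funext d c
    by_cases h : d.contains c
    · simp [h]
    · simp [h, PySem.Dict.getD_of_not_contains d (0 : Int) (by simpa using h)]
  rw [hstep, PySem.Dict.foldl_insert_getD_add_one_eq_counter]

-- congruence of foldl under pointwise-equal step functions
theorem pv_foldl_congr {α β : Type} (l : List β) (f g : α → β → α) (a : α)
    (h : ∀ x y, f x y = g x y) : l.foldl f a = l.foldl g a := by
  induction l generalizing a with
  | nil => rfl
  | cons b l ih => simp [List.foldl, h, ih]

-- one scatter step, on buckets given as a map over template
theorem pv_scatter_step (tl : List Char) (f : Char → List Char) (ch : Char) :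
    ((tl.map f).zip tl).map (fun pt => if pt.2 == ch then pt.1 ++ [ch] else pt.1)
      = tl.map (fun t => if t == ch then f t ++ [ch] else f t) := by
  induction tl with
  | nil => rfl
  | cons t tl ih =>
      simp only [List.map_cons, List.zip_cons_cons]
      rw [ih]

-- invariant of B's loop: the buckets are replicate (count) per template char
theorem pv_scatter_inv (tl : List Char) (xs : List Char) :
    xs.foldl
      (fun parts ch =>
        (parts.zip tl).map (fun pt => if pt.2 == ch then pt.1 ++ [ch] else pt.1))
      (List.replicate tl.length []) =
      tl.map (fun t => List.replicate (xs.count t) t) := by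
  induction xs using List.reverseRecOn with
  | nil => simp
  | append_singleton xs ch ih =>
      rw [List.foldl_append, List.foldl_cons, List.foldl_nil, ih, pv_scatter_step]
      refine List.map_congr_left (fun t _ => ?_)
      by_cases h : t = ch
      · subst h
        simp [List.count_append, List.replicate_succ']
      · simp [h, List.count_append, List.count_singleton]
        exact fun e => h e.symm

-- ===== VERDICT (by name: the statement is the Claim_ definition above) =====
theorem templateString_spec : Claim_equal_templateString := by
  intro s template _
  unfold Spec_templateString templateString templateString_alt
  simp only [pv_countLoop_eq_counter, pv_scatter_inv]
  refine congrArg String.ofList ?_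
  have hfold :
      template.toList.foldl
        (fun r c => if (PySem.Dict.counter s.toList).contains c then
            r ++ List.replicate ((PySem.Dict.counter s.toList).getD c 0).toNat c else r)
        [] =
      template.toList.foldl
        (fun r c => r ++ List.replicate (s.toList.count c) c) [] := by
    refine pv_foldl_congr _ _ _ _ fun r c => ?_
    by_cases h : c ∈ s.toList
    · simp [PySem.Dict.contains_counter, PySem.Dict.getD_counter, h]
    · have h0 : s.toList.count c = 0 := List.count_eq_zero_of_not_mem h
      simp [PySem.Dict.contains_counter, h, h0]
  rw [hfold, PySem.List.foldl_append_eq_flatMap]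
  simp [List.flatMap]
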